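-- pv_equiv track=rewrite | github.com/Emasoft/enchant_cli | src/enchant_book_manager/epub_builder.py | detect_chapter_issues
-- ===== SOURCE A (Python) =====
-- def detect_chapter_issues(seq: list[int]) -> list[tuple[int, str]]:
--     """
--     Detect issues in chapter sequence (missing, out of order, duplicates).
--     Returns list of (position, issue_description) tuples.
--     """
--     issues: list[tuple[int, str]] = []
--     if not seq:
--         return issues
--
--     start, end = seq[0], seq[-1]
--     prev_expected = start
--     seen = set()
--     reported_missing = set()
--
--     for idx, v in enumerate(seq):
--         # Check for repeats
--         if v in seen:
--             # Find nearest non-identical predecessor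
--             pred = None
--             for x in reversed(seq[:idx]):
--                 if x != v:
--                     pred = x
--                     break
--             if pred is not None:
--                 # Count run length
--                 run_len = 1
--                 j = idx
--                 while j + 1 < len(seq) and seq[j + 1] == v:
--                     run_len += 1
--                     j += 1
--                 t = "times" if run_len > 1 else "time"
--                 issues.append((idx, f"Chapter {v} is repeated {run_len} {t} after Chapter {pred}"))
--         else:
--             seen.add(v)
--
--         # Check for missing chapters
--         if v > prev_expected:
--             for m in range(prev_expected + 1, v):
--                 if m not in reported_missing:
--                     issues.append((idx, f"Chapter {m} is missing"))
--                     reported_missing.add(m)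
--             prev_expected = v + 1
--
--         # Exact hit
--         elif v == prev_expected:
--             prev_expected += 1
--
--         # Out of order
--         else:  # v < prev_expected
--             if idx > 0 and abs(seq[idx - 1] - v) == 1 and v < seq[idx - 1]:
--                 a, b = min(v, seq[idx - 1]), max(v, seq[idx - 1])
--                 issues.append((idx, f"Chapter {a} is switched in place with Chapter {b}"))
--                 issues.append((idx, f"Chapter {b} is switched in place with Chapter {a}"))
--             else:
--                 issues.append((idx, f"Chapter {v} is out of place after Chapter {seq[idx - 1]}"))
--             prev_expected = v + 1
--
--     # Check for missing chapters at the end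
--     for m in range(prev_expected, end + 1):
--         if m not in reported_missing:
--             issues.append((len(seq), f"Chapter {m} is missing"))
--
--     issues.sort(key=lambda x: x[0])
--     return issues
-- ===== SOURCE B (Python) =====
-- def detect_chapter_issues(seq: list[int]) -> list[tuple[int, str]]:
--     """Single pass with precomputed run lengths and nearest-distinct predecessors
--     instead of rescanning the prefix/suffix at every repeat."""
--     issues: list[tuple[int, str]] = []
--     if not seq:
--         return issues
--     n = len(seq)
--     # remaining run length starting at each position (backward pass)
--     run = [1] * n
--     for i in range(n - 2, -1, -1):
--         if seq[i] == seq[i + 1]: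
--             run[i] = run[i + 1] + 1
--     # nearest predecessor with a different value (forward pass)
--     pred: list[int | None] = [None] * n
--     for i in range(1, n):
--         pred[i] = seq[i - 1] if seq[i - 1] != seq[i] else pred[i - 1]
--
--     prev_expected = seq[0]
--     prev = seq[0]  # element before the current one (unused on the first step)
--     seen: set[int] = set()
--     reported: set[int] = set()
--     for i, (v, k, p) in enumerate(zip(seq, run, pred)):
--         if v in seen:
--             if p is not None:
--                 t = "times" if k > 1 else "time"
--                 issues.append((i, f"Chapter {v} is repeated {k} {t} after Chapter {p}"))
--         else:
--             seen.add(v)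
--         if v > prev_expected:
--             for m in range(prev_expected + 1, v):
--                 if m not in reported:
--                     issues.append((i, f"Chapter {m} is missing"))
--                     reported.add(m)
--             prev_expected = v + 1
--         elif v == prev_expected:
--             prev_expected += 1
--         else:
--             if prev - v == 1:
--                 issues.append((i, f"Chapter {v} is switched in place with Chapter {prev}"))
--                 issues.append((i, f"Chapter {prev} is switched in place with Chapter {v}"))
--             else:
--                 issues.append((i, f"Chapter {v} is out of place after Chapter {prev}"))
--             prev_expected = v + 1
--         prev = v
--     for m in range(prev_expected, seq[-1] + 1):
--         if m not in reported:
--             issues.append((n, f"Chapter {m} is missing"))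
--     return issues
-- ===== Notes on version B (the rewrite author's own statement) =====
-- stated objective: alternative
-- what changed: B replaces A's per-repeat backward rescan of the prefix and forward rescan of the run (and the final no-op sort) by two linear precomputation passes (remaining run lengths, nearest distinct predecessor) consumed in a single zip loop that also carries the previous element.
import Mathlib
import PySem

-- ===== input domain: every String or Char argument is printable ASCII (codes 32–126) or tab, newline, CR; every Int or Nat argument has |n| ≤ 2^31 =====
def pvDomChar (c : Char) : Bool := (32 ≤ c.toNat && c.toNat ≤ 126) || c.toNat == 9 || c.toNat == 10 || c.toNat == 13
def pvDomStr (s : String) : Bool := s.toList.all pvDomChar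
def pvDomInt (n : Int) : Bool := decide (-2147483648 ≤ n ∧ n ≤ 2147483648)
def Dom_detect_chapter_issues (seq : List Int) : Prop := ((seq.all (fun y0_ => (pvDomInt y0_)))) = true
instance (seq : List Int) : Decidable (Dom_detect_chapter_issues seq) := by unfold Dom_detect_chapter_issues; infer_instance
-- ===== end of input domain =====

-- B replaces A's per-repeat backward/forward rescans (and A's no-op final sort) by two linear
-- precomputation passes — remaining run lengths and nearest distinct predecessors — consumed in a
-- single loop that carries the previous element (alternative algorithm, same observed cost).

-- message builders ("Chapter {..} ..."), identical literals in both Pythons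
def pvMsgMissing (m : Int) : String := "Chapter " ++ PySem.Int.toStr m ++ " is missing"
def pvMsgRepeat (v k p : Int) : String :=
  "Chapter " ++ PySem.Int.toStr v ++ " is repeated " ++ PySem.Int.toStr k ++ " " ++
    (if k > 1 then "times" else "time") ++ " after Chapter " ++ PySem.Int.toStr p
def pvMsgSwitch (a b : Int) : String :=
  "Chapter " ++ PySem.Int.toStr a ++ " is switched in place with Chapter " ++ PySem.Int.toStr b
def pvMsgOut (v p : Int) : String :=
  "Chapter " ++ PySem.Int.toStr v ++ " is out of place after Chapter " ++ PySem.Int.toStr p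

-- 'for m in range(lo, hi): if m not in reported: issues.append(..); reported.add(m)' — verbatim in both Pythons
def pvFillMissing (i lo hi : Int) (issues : List (Int × String)) (rep : PySem.Set Int) :
    List (Int × String) × PySem.Set Int :=
  (PySem.List.pyRange lo hi 1).foldl
    (fun st m => if m ∈ st.2 then st else (st.1 ++ [(i, pvMsgMissing m)], PySem.Set.add st.2 m))
    (issues, rep)

-- final 'for m in range(lo, hi): if m not in reported: issues.append(..)' — verbatim in both Pythons
def pvTailMissing (i lo hi : Int) (rep : PySem.Set Int) (issues : List (Int × String)) :
    List (Int × String) :=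
  (PySem.List.pyRange lo hi 1).foldl
    (fun iss m => if m ∈ rep then iss else iss ++ [(i, pvMsgMissing m)]) issues

-- ===== PORT A =====
-- 'for x in reversed(seq[:idx]): if x != v: pred = x; break'
def predScanA (v : Int) : List Int → Option Int
  | [] => none
  | x :: xs => if x ≠ v then some x else predScanA v xs

-- the 'while j + 1 < len(seq) and seq[j+1] == v: run_len += 1' count, taken on the suffix after idx
def runCountA (v : Int) : List Int → Int
  | [] => 0
  | x :: xs => if x = v then 1 + runCountA v xs else 0

-- 'for idx, v in enumerate(seq)' with state (prev_expected, seen, reported, issues)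
def loopA (seq : List Int) : Nat → List Int → Int → PySem.Set Int → PySem.Set Int →
    List (Int × String) → List (Int × String) × Int × PySem.Set Int
  | _, [], pe, _, rep, issues => (issues, pe, rep)
  | idx, v :: rest, pe, seen, rep, issues =>
    let st1 :=
      if v ∈ seen then
        match predScanA v ((seq.take idx).reverse) with
        | some p =>
            (issues ++ [((idx : Int), pvMsgRepeat v (1 + runCountA v (seq.drop (idx + 1))) p)], seen)
        | none => (issues, seen)
      else (issues, PySem.Set.add seen v)
    if v > pe then
      let st2 := pvFillMissing (idx : Int) (pe + 1) v st1.1 rep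
      loopA seq (idx + 1) rest (v + 1) st1.2 st2.2 st2.1
    else if v = pe then
      loopA seq (idx + 1) rest (pe + 1) st1.2 rep st1.1
    else
      let pv := (PySem.List.pyGet? seq ((idx : Int) - 1)).getD 0
      let issues2 :=
        if idx > 0 ∧ (pv - v).natAbs = 1 ∧ v < pv then
          st1.1 ++ [((idx : Int), pvMsgSwitch (min v pv) (max v pv)),
                    ((idx : Int), pvMsgSwitch (max v pv) (min v pv))]
        else st1.1 ++ [((idx : Int), pvMsgOut v pv)]
      loopA seq (idx + 1) rest (v + 1) st1.2 rep issues2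

def detect_chapter_issues (seq : List Int) : List (Int × String) :=
  match seq with
  | [] => []
  | s0 :: _ =>
    let endv := (PySem.List.pyGet? seq (-1)).getD 0
    let r := loopA seq 0 seq s0 PySem.Set.empty PySem.Set.empty []
    let issues := pvTailMissing (seq.length : Int) r.2.1 (endv + 1) r.2.2 r.1
    PySem.List.sorted issues (fun x => x.1) false

-- ===== PORT B =====
-- backward pass: remaining run length at each position ('run[i] = run[i+1] + 1 if seq[i] == seq[i+1] else 1')
def runListB : List Int → List Int
  | [] => []
  | [_] => [1]
  | v :: x :: rest =>
    (if v = x then (runListB (x :: rest)).headD 1 + 1 else 1) :: runListB (x :: rest)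

-- forward pass: nearest predecessor with a different value ('pred[i] = seq[i-1] if seq[i-1] != seq[i] else pred[i-1]')
def predListB : Option Int → Int → List Int → List (Option Int)
  | _, _, [] => []
  | p, prev, v :: rest =>
    (if prev ≠ v then some prev else p) :: predListB (if prev ≠ v then some prev else p) v rest

-- 'for i, (v, k, p) in enumerate(zip(seq, run, pred))', carrying prev
def loopB : Nat → List Int → List Int → List (Option Int) → Int → Int → PySem.Set Int →
    PySem.Set Int → List (Int × String) → List (Int × String) × Int × PySem.Set Int
  | i, v :: vs, k :: ks, p :: ps, pe, prev, seen, rep, issues =>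
    let st1 :=
      if v ∈ seen then
        match p with
        | some pv => (issues ++ [((i : Int), pvMsgRepeat v k pv)], seen)
        | none => (issues, seen)
      else (issues, PySem.Set.add seen v)
    if v > pe then
      let st2 := pvFillMissing (i : Int) (pe + 1) v st1.1 rep
      loopB (i + 1) vs ks ps (v + 1) v st1.2 st2.2 st2.1
    else if v = pe then
      loopB (i + 1) vs ks ps (pe + 1) v st1.2 rep st1.1
    else
      let issues2 :=
        if prev - v = 1 then
          st1.1 ++ [((i : Int), pvMsgSwitch v prev), ((i : Int), pvMsgSwitch prev v)]
        else st1.1 ++ [((i : Int), pvMsgOut v prev)]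
      loopB (i + 1) vs ks ps (v + 1) v st1.2 rep issues2
  | _, _, _, _, pe, _, _, rep, issues => (issues, pe, rep)

def detect_chapter_issues_alt (seq : List Int) : List (Int × String) :=
  match seq with
  | [] => []
  | s0 :: tl =>
    let run := runListB (s0 :: tl)
    let pred := none :: predListB none s0 tl
    let endv := (PySem.List.pyGet? (s0 :: tl) (-1)).getD 0
    let r := loopB 0 (s0 :: tl) run pred s0 s0 PySem.Set.empty PySem.Set.empty []
    pvTailMissing (((s0 :: tl).length : Nat) : Int) r.2.1 (endv + 1) r.2.2 r.1

-- ===== PRECONDITION & SPEC =====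
def Spec_detect_chapter_issues (seq : List Int) (out : List (Int × String)) : Prop := out = detect_chapter_issues_alt seq
instance (seq : List Int) (out : List (Int × String)) : Decidable (Spec_detect_chapter_issues seq out) := by unfold Spec_detect_chapter_issues; infer_instance

-- ===== CLAIM (what is proved, stated in full; the proofs are below) =====
def Claim_equal_detect_chapter_issues : Prop := ∀ (seq : List Int), Dom_detect_chapter_issues seq → Spec_detect_chapter_issues seq (detect_chapter_issues seq)

-- ===== LEMMAS AND PROOFS =====

-- B's run list, unfolded one element: its head is A's run count at that position
theorem runListB_cons (v : Int) (rest : List Int) :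
    runListB (v :: rest) = (1 + runCountA v rest) :: runListB rest := by
  induction rest generalizing v with
  | nil => simp [runListB, runCountA]
  | cons x xs ih =>
      by_cases h : v = x
      · subst h
        simp [runListB, runCountA, ih v]
        omega
      · simp [runListB, runCountA, ih x, h, Ne.symm h]

-- the main loops agree, given the positional invariants
theorem loop_eq : ∀ (rest pre : List Int) (prev pe : Int) (seen rep : PySem.Set Int)
    (issues : List (Int × String)),
    loopA (pre ++ prev :: rest) (pre.length + 1) rest pe seen rep issues
      = loopB (pre.length + 1) rest (runListB rest)
          (predListB (predScanA prev pre.reverse) prev rest) pe prev seen rep issues := by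
  intro rest
  induction rest with
  | nil => intro pre prev pe seen rep issues; simp [loopA, loopB]
  | cons v rest' ih =>
    intro pre prev pe seen rep issues
    have htake : (pre ++ prev :: v :: rest').take (pre.length + 1) = pre ++ [prev] := by
      have h2 : pre ++ prev :: v :: rest' = (pre ++ [prev]) ++ v :: rest' := by simp
      rw [h2]
      have h3 : pre.length + 1 = (pre ++ [prev]).length := by simp
      rw [h3, List.take_left]
    have hdrop : (pre ++ prev :: v :: rest').drop (pre.length + 1 + 1) = rest' := by
      have h2 : pre ++ prev :: v :: rest' = (pre ++ [prev, v]) ++ rest' := by simp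
      rw [h2]
      have h3 : pre.length + 1 + 1 = (pre ++ [prev, v]).length := by simp
      rw [h3, List.drop_left]
    have hget : (PySem.List.pyGet? (pre ++ prev :: v :: rest') (((pre.length + 1 : Nat) : Int) - 1)).getD 0 = prev := by
      have h1 : (((pre.length + 1 : Nat) : Int) - 1) = ((pre.length : Nat) : Int) := by push_cast; ring
      rw [h1, PySem.List.pyGet?_append_length]
      rfl
    have hpred : (if prev ≠ v then some prev else predScanA prev pre.reverse)
        = predScanA v ((pre ++ [prev]).reverse) := by
      by_cases h : prev = v
      · subst h; simp [predScanA]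
      · simp [predScanA, h]
    have hIH : ∀ (pe' : Int) (seen' rep' : PySem.Set Int) (issues' : List (Int × String)),
        loopA (pre ++ prev :: v :: rest') (pre.length + 1 + 1) rest' pe' seen' rep' issues'
          = loopB (pre.length + 1 + 1) rest' (runListB rest')
              (predListB (if prev ≠ v then some prev else predScanA prev pre.reverse) v rest')
              pe' v seen' rep' issues' := by
      intro pe' seen' rep' issues'
      have h := ih (pre ++ [prev]) v pe' seen' rep' issues'
      rw [hpred]
      simpa using h
    rw [runListB_cons, predListB]
    simp only [loopA, loopB, htake, hdrop, hget, ← hpred]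
    by_cases hgt : v > pe
    · simp only [if_pos hgt]
      exact hIH _ _ _ _
    · simp only [if_neg hgt]
      by_cases heq : v = pe
      · simp only [if_pos heq]
        exact hIH _ _ _ _
      · simp only [if_neg heq]
        by_cases hsw : prev - v = 1
        · have hc : pre.length + 1 > 0 ∧ (prev - v).natAbs = 1 ∧ v < prev := by
            refine ⟨by omega, by omega, by omega⟩
          rw [if_pos hc, if_pos hsw]
          have hmin : min v prev = v := by omega
          have hmax : max v prev = prev := by omega
          rw [hmin, hmax]
          exact hIH _ _ _ _
        · have hc : ¬ (pre.length + 1 > 0 ∧ (prev - v).natAbs = 1 ∧ v < prev) := by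
            intro h; omega
          rw [if_neg hc, if_neg hsw]
          exact hIH _ _ _ _

-- starting the two loops at index 0 (first element is an exact hit on itself)
theorem loop0 (s0 : Int) (tl : List Int) :
    loopA (s0 :: tl) 0 (s0 :: tl) s0 PySem.Set.empty PySem.Set.empty []
      = loopB 0 (s0 :: tl) (runListB (s0 :: tl)) (none :: predListB none s0 tl)
          s0 s0 PySem.Set.empty PySem.Set.empty [] := by
  rw [runListB_cons]
  simp only [loopA, loopB]
  have hnm : s0 ∉ (PySem.Set.empty : PySem.Set Int) := by simp [PySem.Set.empty]
  simp only [hnm, if_neg, lt_irrefl, not_false_iff, if_true]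
  have h := loop_eq tl [] s0 (s0 + 1) (PySem.Set.add PySem.Set.empty s0) PySem.Set.empty []
  simpa [predScanA] using h

-- appending issues at the current position keeps the order invariant
theorem append_inv (i : Int) (base tail : List (Int × String))
    (hb1 : base.Pairwise (fun a b => a.1 ≤ b.1)) (hb2 : ∀ e ∈ base, e.1 ≤ i)
    (ht1 : tail.Pairwise (fun a b => a.1 ≤ b.1)) (ht2 : ∀ e ∈ tail, e.1 = i) :
    (base ++ tail).Pairwise (fun a b => a.1 ≤ b.1) ∧ ∀ e ∈ base ++ tail, e.1 ≤ i := by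
  refine ⟨List.pairwise_append.2 ⟨hb1, ht1, ?_⟩, ?_⟩
  · intro a ha b hb; rw [ht2 b hb]; exact hb2 a ha
  · intro e he
    rcases List.mem_append.1 he with h | h
    · exact hb2 e h
    · rw [ht2 e h]

-- every issue pvFillMissing adds has position i: the order invariant is preserved
theorem fill_aux (i : Int) : ∀ (ms : List Int) (issues : List (Int × String)) (rep : PySem.Set Int),
    issues.Pairwise (fun a b => a.1 ≤ b.1) → (∀ e ∈ issues, e.1 ≤ i) →
    (ms.foldl (fun st m => if m ∈ st.2 then st
        else (st.1 ++ [(i, pvMsgMissing m)], PySem.Set.add st.2 m)) (issues, rep)).1.Pairwise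
          (fun a b => a.1 ≤ b.1) ∧
      ∀ e ∈ (ms.foldl (fun st m => if m ∈ st.2 then st
        else (st.1 ++ [(i, pvMsgMissing m)], PySem.Set.add st.2 m)) (issues, rep)).1, e.1 ≤ i := by
  intro ms
  induction ms with
  | nil => intro issues rep h1 h2; exact ⟨h1, h2⟩
  | cons m ms ihm =>
    intro issues rep h1 h2
    simp only [List.foldl_cons]
    by_cases hm : m ∈ rep
    · simp only [hm, if_pos]
      exact ihm issues rep h1 h2
    · simp only [hm, if_neg, not_false_iff]
      have h := append_inv i issues [(i, pvMsgMissing m)] h1 h2 (by simp) (by simp)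
      exact ihm _ _ h.1 h.2

theorem fill_inv (i lo hi : Int) (issues : List (Int × String)) (rep : PySem.Set Int)
    (h1 : issues.Pairwise (fun a b => a.1 ≤ b.1)) (h2 : ∀ e ∈ issues, e.1 ≤ i) :
    (pvFillMissing i lo hi issues rep).1.Pairwise (fun a b => a.1 ≤ b.1) ∧
      ∀ e ∈ (pvFillMissing i lo hi issues rep).1, e.1 ≤ i := by
  unfold pvFillMissing
  exact fill_aux i _ issues rep h1 h2

-- loopB keeps positions nondecreasing and bounded by index plus remaining length
theorem loopB_inv : ∀ (vs : List Int) (ks : List Int) (ps : List (Option Int)) (i : Nat)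
    (pe prev : Int) (seen rep : PySem.Set Int) (issues : List (Int × String)),
    issues.Pairwise (fun a b => a.1 ≤ b.1) → (∀ e ∈ issues, e.1 ≤ (i : Int)) →
    (loopB i vs ks ps pe prev seen rep issues).1.Pairwise (fun a b => a.1 ≤ b.1) ∧
      ∀ e ∈ (loopB i vs ks ps pe prev seen rep issues).1, e.1 ≤ (i : Int) + vs.length := by
  intro vs
  induction vs with
  | nil =>
    intro ks ps i pe prev seen rep issues h1 h2
    refine ⟨by simp only [loopB]; exact h1, ?_⟩
    intro e he
    simp only [loopB] at he
    have := h2 e he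
    simp only [List.length_nil]
    omega
  | cons v vs' ih =>
    intro ks ps i pe prev seen rep issues h1 h2
    match ks, ps with
    | [], ps =>
      refine ⟨by simp only [loopB]; exact h1, ?_⟩
      intro e he
      simp only [loopB] at he
      have := h2 e he
      simp only [List.length_cons]
      push_cast
      omega
    | k :: ks', [] =>
      refine ⟨by simp only [loopB]; exact h1, ?_⟩
      intro e he
      simp only [loopB] at he
      have := h2 e he
      simp only [List.length_cons]
      push_cast
      omega
    | k :: ks', p :: ps' =>
      have hstep : ∀ (issues' : List (Int × String)),
          issues'.Pairwise (fun a b => a.1 ≤ b.1) → (∀ e ∈ issues', e.1 ≤ (i : Int)) →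
          ∀ (pe' prev' : Int) (seen' rep' : PySem.Set Int),
          (loopB (i + 1) vs' ks' ps' pe' prev' seen' rep' issues').1.Pairwise (fun a b => a.1 ≤ b.1) ∧
            ∀ e ∈ (loopB (i + 1) vs' ks' ps' pe' prev' seen' rep' issues').1,
              e.1 ≤ (i : Int) + (v :: vs').length := by
        intro issues' ha hb pe' prev' seen' rep'
        have h := ih ks' ps' (i + 1) pe' prev' seen' rep' issues' ha
          (by intro e he; have := hb e he; push_cast; omega)
        refine ⟨h.1, ?_⟩
        intro e he
        have := h.2 e he
        simp only [List.length_cons] at this ⊢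
        push_cast at this ⊢
        omega
      simp only [loopB]
      by_cases hv : v ∈ seen
      · simp only [hv, if_pos]
        cases p with
        | some pv =>
          have hbase := append_inv (i : Int) issues [((i : Int), pvMsgRepeat v k pv)] h1 h2
            (by simp) (by simp)
          by_cases hgt : v > pe
          · simp only [if_pos hgt]
            have hf := fill_inv (i : Int) (pe + 1) v _ rep hbase.1 hbase.2
            exact hstep _ hf.1 hf.2 _ _ _ _
          · simp only [if_neg hgt]
            by_cases heq : v = pe
            · simp only [if_pos heq]
              exact hstep _ hbase.1 hbase.2 _ _ _ _
            · simp only [if_neg heq]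
              by_cases hsw : prev - v = 1
              · simp only [if_pos hsw]
                have h := append_inv (i : Int) _
                  [((i : Int), pvMsgSwitch v prev), ((i : Int), pvMsgSwitch prev v)]
                  hbase.1 hbase.2 (by simp) (by simp)
                exact hstep _ h.1 h.2 _ _ _ _
              · simp only [if_neg hsw]
                have h := append_inv (i : Int) _ [((i : Int), pvMsgOut v prev)]
                  hbase.1 hbase.2 (by simp) (by simp)
                exact hstep _ h.1 h.2 _ _ _ _
        | none =>
          by_cases hgt : v > pe
          · simp only [if_pos hgt]
            have hf := fill_inv (i : Int) (pe + 1) v _ rep h1 h2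
            exact hstep _ hf.1 hf.2 _ _ _ _
          · simp only [if_neg hgt]
            by_cases heq : v = pe
            · simp only [if_pos heq]
              exact hstep _ h1 h2 _ _ _ _
            · simp only [if_neg heq]
              by_cases hsw : prev - v = 1
              · simp only [if_pos hsw]
                have h := append_inv (i : Int) _
                  [((i : Int), pvMsgSwitch v prev), ((i : Int), pvMsgSwitch prev v)]
                  h1 h2 (by simp) (by simp)
                exact hstep _ h.1 h.2 _ _ _ _
              · simp only [if_neg hsw]
                have h := append_inv (i : Int) _ [((i : Int), pvMsgOut v prev)]
                  h1 h2 (by simp) (by simp)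
                exact hstep _ h.1 h.2 _ _ _ _
      · simp only [hv, if_neg, not_false_iff]
        by_cases hgt : v > pe
        · simp only [if_pos hgt]
          have hf := fill_inv (i : Int) (pe + 1) v _ rep h1 h2
          exact hstep _ hf.1 hf.2 _ _ _ _
        · simp only [if_neg hgt]
          by_cases heq : v = pe
          · simp only [if_pos heq]
            exact hstep _ h1 h2 _ _ _ _
          · simp only [if_neg heq]
            by_cases hsw : prev - v = 1
            · simp only [if_pos hsw]
              have h := append_inv (i : Int) _
                [((i : Int), pvMsgSwitch v prev), ((i : Int), pvMsgSwitch prev v)]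
                h1 h2 (by simp) (by simp)
              exact hstep _ h.1 h.2 _ _ _ _
            · simp only [if_neg hsw]
              have h := append_inv (i : Int) _ [((i : Int), pvMsgOut v prev)]
                h1 h2 (by simp) (by simp)
              exact hstep _ h.1 h.2 _ _ _ _

-- the trailing missing-chapter loop also keeps the list nondecreasing
theorem tail_aux (i : Int) (rep : PySem.Set Int) : ∀ (ms : List Int) (issues : List (Int × String)),
    issues.Pairwise (fun a b => a.1 ≤ b.1) → (∀ e ∈ issues, e.1 ≤ i) →
    (ms.foldl (fun iss m => if m ∈ rep then iss else iss ++ [(i, pvMsgMissing m)]) issues).Pairwise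
      (fun a b => a.1 ≤ b.1) := by
  intro ms
  induction ms with
  | nil => intro issues h1 _; exact h1
  | cons m ms ihm =>
    intro issues h1 h2
    simp only [List.foldl_cons]
    by_cases hm : m ∈ rep
    · simp only [hm, if_pos]
      exact ihm issues h1 h2
    · simp only [hm, if_neg, not_false_iff]
      have h := append_inv i issues [(i, pvMsgMissing m)] h1 h2 (by simp) (by simp)
      exact ihm _ h.1 h.2

theorem tail_inv (i lo hi : Int) (rep : PySem.Set Int) (issues : List (Int × String))
    (h1 : issues.Pairwise (fun a b => a.1 ≤ b.1)) (h2 : ∀ e ∈ issues, e.1 ≤ i) :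
    (pvTailMissing i lo hi rep issues).Pairwise (fun a b => a.1 ≤ b.1) := by
  unfold pvTailMissing
  exact tail_aux i rep _ issues h1 h2

-- ===== VERDICT (by name: the statement is the Claim_ definition above) =====
theorem detect_chapter_issues_spec : Claim_equal_detect_chapter_issues := by
  unfold Claim_equal_detect_chapter_issues Spec_detect_chapter_issues
  intro seq _
  match seq with
  | [] => rfl
  | s0 :: tl =>
    show PySem.List.sorted _ _ _ = _
    rw [detect_chapter_issues_alt]
    simp only [loop0]
    set r := loopB 0 (s0 :: tl) (runListB (s0 :: tl)) (none :: predListB none s0 tl)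
      s0 s0 PySem.Set.empty PySem.Set.empty [] with hr
    have hinv := loopB_inv (s0 :: tl) (runListB (s0 :: tl)) (none :: predListB none s0 tl)
      0 s0 s0 PySem.Set.empty PySem.Set.empty [] (by simp) (by simp)
    rw [← hr] at hinv
    apply PySem.List.sorted_eq_self_of_pairwise
    apply tail_inv
    · exact hinv.1
    · intro e he
      have := hinv.2 e he
      simpa using this
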